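-- pv_equiv track=rewrite | github.com/97Kzone/CodeTest_practice | PG_Level3/moved110.py | solution
-- ===== SOURCE A (Python) =====
-- def solution(s):
--     answer = []
--
--     #모든 케이스에 대해서
--     for t in s:
--         std, cnt = [], 0
--         for c in t:
--             if c == "1":
--                 std.append(c)
--             else:
--                 if std[-2:] == ["1", "1"]:
--                     std.pop()
--                     std.pop()
--                     cnt += 1
--                 else:
--                     std.append(c)
--
--         v = "110" * cnt
--         std = "".join(std)
--         if "0" in std:
--             idx = std.rfind("0")
--             answer.append(std[:idx+1] + v + std[idx+1:])
--         else:
--             answer.append(v + std)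
--
--
--
--
--     return answer
-- ===== SOURCE B (Python) =====
-- def _find_redex(u):
--     for i in range(len(u) - 2):
--         if u[i] == "1" and u[i + 1] == "1" and u[i + 2] != "1":
--             return i
--     return -1
--
--
-- def solution(s):
--     answer = []
--     for t in s:
--         t2 = t
--         while True:
--             i = _find_redex(t2)
--             if i < 0:
--                 break
--             t2 = t2[:i] + t2[i + 3:]
--         cnt = (len(t) - len(t2)) // 3
--         std = t2
--         v = "110" * cnt
--         if "0" in std:
--             idx = std.rfind("0")
--             answer.append(std[:idx + 1] + v + std[idx + 1:])
--         else:
--             answer.append(v + std)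
--     return answer
-- ===== Notes on version B (the rewrite author's own statement) =====
-- stated objective: alternative
-- what changed: A's single left-to-right pass with an explicit stack is replaced by iterated deletion of the leftmost '11x' (x != '1') block until none remains, recovering the count from the length difference; the system is confluent because blocks never overlap, so the normal form and count coincide with A's stack result.
import Mathlib
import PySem

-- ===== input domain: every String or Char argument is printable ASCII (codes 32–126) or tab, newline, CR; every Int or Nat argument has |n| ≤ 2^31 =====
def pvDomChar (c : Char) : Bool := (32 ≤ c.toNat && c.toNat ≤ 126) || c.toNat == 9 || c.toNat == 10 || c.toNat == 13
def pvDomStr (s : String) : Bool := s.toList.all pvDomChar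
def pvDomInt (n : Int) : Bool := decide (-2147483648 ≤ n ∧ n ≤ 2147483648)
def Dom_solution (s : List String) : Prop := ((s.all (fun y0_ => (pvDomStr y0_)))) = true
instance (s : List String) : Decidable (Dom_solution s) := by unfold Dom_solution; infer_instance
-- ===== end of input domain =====

-- B replaces A's one-pass stack removal by iterated leftmost deletion of "11x" (x ≠ '1') blocks; objective: alternative (not faster).

-- ===== PORT A =====
-- body of A's inner character loop; state = (std, cnt)
def solStepA (st : List Char × Int) (c : Char) : List Char × Int :=
  if c = '1' then (st.1 ++ [c], st.2)
  else if PySem.List.slice st.1 (some (-2)) none = ['1', '1'] then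
    -- std.pop(); std.pop(): the guard std[-2:] == ["1","1"] guarantees len(std) ≥ 2,
    -- so the two pops are exactly two dropLast (exact here)
    (st.1.dropLast.dropLast, st.2 + 1)
  else (st.1 ++ [c], st.2)

-- A's per-string tail: v = "110"*cnt, "".join(std) (std is kept as List Char, join = String.ofList),
-- '"0" in std' for the single character "0" is exactly membership of '0' (ported via PySem.Chars.isIn)
def solTailA (std : List Char) (cnt : Int) : String :=
  let v := PySem.List.pyRepeat ['1', '1', '0'] cnt
  if PySem.Chars.isIn ['0'] std then
    let idx := PySem.Chars.rfind std ['0']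
    String.ofList (PySem.List.slice std none (some (idx + 1)) ++ v ++
      PySem.List.slice std (some (idx + 1)) none)
  else
    String.ofList (v ++ std)

def solOneA (t : String) : String :=
  let st := t.toList.foldl solStepA (([], 0) : List Char × Int)
  solTailA st.1 st.2

def solution (s : List String) : List String :=
  s.foldl (fun answer t => answer ++ [solOneA t]) []

-- ===== PORT B =====
-- _find_redex: scan i = 0,1,… over windows u[i], u[i+1], u[i+2]
def findRedexAux : List Char → Int → Int
  | a :: b :: c :: rest, i =>
      if a = '1' ∧ b = '1' ∧ c ≠ '1' then i else findRedexAux (b :: c :: rest) (i + 1)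
  | _, _ => -1

-- needed by reduceAll's termination proof (cited in decreasing_by)
theorem findRedexAux_found : ∀ (u : List Char) (j : Int), 0 ≤ findRedexAux u j →
    ∃ x c z, u = x ++ '1' :: '1' :: c :: z ∧ c ≠ '1' ∧ findRedexAux u j = j + x.length := by
  intro u
  induction u with
  | nil => intro j h; simp [findRedexAux] at h
  | cons a t ih =>
    intro j h
    rcases t with _ | ⟨b, t2⟩
    · simp [findRedexAux] at h
    rcases t2 with _ | ⟨c, rest⟩
    · simp [findRedexAux] at h
    by_cases hcond : a = '1' ∧ b = '1' ∧ c ≠ '1'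
    · refine ⟨[], c, rest, ?_, hcond.2.2, ?_⟩
      · simp [hcond.1, hcond.2.1]
      · simp [findRedexAux, hcond]
    · rw [findRedexAux, if_neg hcond] at h
      obtain ⟨x, c', z, he, hc', hv⟩ := ih (j + 1) h
      refine ⟨a :: x, c', z, by rw [List.cons_append, ← he], hc', ?_⟩
      rw [findRedexAux, if_neg hcond, hv]
      push_cast [List.length_cons]
      ring

-- while-loop of B: delete the leftmost "11x" block until none is left
def reduceAll (u : List Char) : List Char :=
  if _h : findRedexAux u 0 < 0 then u
  else reduceAll (PySem.List.slice u none (some (findRedexAux u 0)) ++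
                  PySem.List.slice u (some (findRedexAux u 0 + 3)) none)
termination_by u.length
decreasing_by
  obtain ⟨x, c, z, hu, _hc, hv⟩ := findRedexAux_found u 0 (by omega)
  rw [hv, zero_add]
  rw [PySem.List.slice_to_natCast]
  rw [show ((x.length : Int) + 3) = ((x.length + 3 : Nat) : Int) by push_cast; ring]
  rw [PySem.List.slice_from_natCast]
  subst hu
  simp [List.length_append]
  omega

-- B's per-string tail (verbatim the same final lines as in A)
def solTailB (std : List Char) (cnt : Int) : String :=
  let v := PySem.List.pyRepeat ['1', '1', '0'] cnt
  if PySem.Chars.isIn ['0'] std then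
    let idx := PySem.Chars.rfind std ['0']
    String.ofList (PySem.List.slice std none (some (idx + 1)) ++ v ++
      PySem.List.slice std (some (idx + 1)) none)
  else
    String.ofList (v ++ std)

def solOneB (t : String) : String :=
  let t2 := reduceAll t.toList
  let cnt := PySem.Int.floordiv (PySem.List.len t.toList - PySem.List.len t2) 3
  solTailB t2 cnt

def solution_alt (s : List String) : List String :=
  s.foldl (fun answer t => answer ++ [solOneB t]) []

-- ===== PRECONDITION & SPEC =====
def Spec_solution (s : List String) (out : List String) : Prop := out = solution_alt s
instance (s : List String) (out : List String) : Decidable (Spec_solution s out) := by unfold Spec_solution; infer_instance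

-- ===== CLAIM (what is proved, stated in full; the proofs are below) =====
def Claim_equal_solution : Prop := ∀ (s : List String), Dom_solution s → Spec_solution s (solution s)

-- ===== LEMMAS AND PROOFS =====

theorem cons3_of_len (L : List Char) (h3 : 3 ≤ L.length) : ∃ a b c r, L = a :: b :: c :: r := by
  rcases L with _ | ⟨a, L⟩
  · simp at h3
  rcases L with _ | ⟨b, L⟩
  · simp at h3
  rcases L with _ | ⟨c, L⟩
  · simp at h3
  exact ⟨a, b, c, L, rfl⟩

-- a string containing a "11x" block is never reported redex-free
theorem findRedexAux_of_decomp (c : Char) (z : List Char) (hc : c ≠ '1') :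
    ∀ (x : List Char) (j : Int), 0 ≤ j → 0 ≤ findRedexAux (x ++ '1' :: '1' :: c :: z) j := by
  intro x
  induction x with
  | nil =>
    intro j hj
    simp only [List.nil_append]
    rw [findRedexAux, if_pos ⟨rfl, rfl, hc⟩]
    exact hj
  | cons a x ih =>
    intro j hj
    obtain ⟨p, q, r, tl, hsh⟩ := cons3_of_len (x ++ '1' :: '1' :: c :: z) (by simp; omega)
    rw [List.cons_append, hsh, findRedexAux]
    split
    · exact hj
    · rw [← hsh]
      exact ih (j + 1) (by omega)

-- the cnt accumulator only shifts the second component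
theorem foldl_stepA_shift (l : List Char) : ∀ (st : List Char × Int) (k : Int),
    l.foldl solStepA (st.1, st.2 + k) = ((l.foldl solStepA st).1, (l.foldl solStepA st).2 + k) := by
  induction l with
  | nil => intro st k; simp
  | cons c l ih =>
    intro st k
    simp only [List.foldl_cons]
    have hstep : solStepA (st.1, st.2 + k) c = ((solStepA st c).1, (solStepA st c).2 + k) := by
      unfold solStepA; split_ifs <;> simp <;> ring
    rw [hstep]
    exact ih (solStepA st c) k

-- running A's loop across a "11x" block returns to the same stack, with cnt + 1
theorem foldl_stepA_block (std : List Char) (cnt : Int) (c : Char) (hc : c ≠ '1') :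
    ['1', '1', c].foldl solStepA (std, cnt) = (std, cnt + 1) := by
  simp only [List.foldl_cons, List.foldl_nil]
  rw [show solStepA (std, cnt) '1' = (std ++ ['1'], cnt) from by simp [solStepA]]
  rw [show solStepA (std ++ ['1'], cnt) '1' = (std ++ ['1', '1'], cnt) from by
        simp [solStepA, List.append_assoc]]
  have hsl : PySem.List.slice (std ++ ['1', '1']) (some (-2)) none = ['1', '1'] := by
    rw [PySem.List.slice_from_neg_ofNat _ 2 (by omega)]
    simp
  unfold solStepA
  rw [if_neg (by simpa using hc), if_pos (by simpa using hsl)]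
  rw [show std ++ ['1', '1'] = (std ++ ['1']) ++ ['1'] by simp]
  rw [List.dropLast_concat, List.dropLast_concat]

-- on a block-free string A's loop is the identity (stack = processed prefix)
theorem nf_run : ∀ (q p : List Char) (cnt : Int),
    (∀ x (c : Char) z, c ≠ '1' → p ++ q ≠ x ++ '1' :: '1' :: c :: z) →
    q.foldl solStepA (p, cnt) = (p ++ q, cnt) := by
  intro q
  induction q with
  | nil => intro p cnt _; simp
  | cons c q ih =>
    intro p cnt H
    simp only [List.foldl_cons]
    by_cases hc : c = '1'
    · subst hc
      rw [show solStepA (p, cnt) '1' = (p ++ ['1'], cnt) from by simp [solStepA]]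
      rw [ih (p ++ ['1']) cnt (by intro x d z hd; have := H x d z hd; simpa using this)]
      simp
    · have hguard : ¬ PySem.List.slice p (some (-2)) none = ['1', '1'] := by
        intro hg
        rw [PySem.List.slice_from_neg_ofNat _ 2 (by omega)] at hg
        have hlen : 2 ≤ p.length := by
          have := congrArg List.length hg
          simp [List.length_drop] at this
          omega
        have hp : p = p.take (p.length - 2) ++ ['1', '1'] := by
          conv_lhs => rw [← List.take_append_drop (p.length - 2) p]
          rw [hg]
        refine H (p.take (p.length - 2)) c q hc ?_
        conv_lhs => rw [hp]
        simp
      rw [show solStepA (p, cnt) c = (p ++ [c], cnt) from by simp [solStepA, hc, hguard]]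
      rw [ih (p ++ [c]) cnt (by intro x d z hd; have := H x d z hd; simpa using this)]
      simp

-- main invariant: A's loop lands on B's normal form, counting the deleted blocks
theorem main_run : ∀ (n : Nat) (u : List Char), u.length ≤ n →
    ∃ k : Nat, u.foldl solStepA (([], 0) : List Char × Int) = (reduceAll u, (k : Int)) ∧
      u.length = (reduceAll u).length + 3 * k := by
  intro n
  induction n with
  | zero =>
    intro u hu
    have hnil : u = [] := by cases u with | nil => rfl | cons a t => simp at hu
    subst hnil
    refine ⟨0, by rw [reduceAll]; simp [findRedexAux], by rw [reduceAll]; simp [findRedexAux]⟩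
  | succ n ih =>
    intro u hu
    by_cases hneg : findRedexAux u 0 < 0
    · have hnf : ∀ x (c : Char) z, c ≠ '1' → u ≠ x ++ '1' :: '1' :: c :: z := by
        intro x c z hc he
        have := findRedexAux_of_decomp c z hc x 0 le_rfl
        rw [← he] at this
        omega
      have hr : reduceAll u = u := by rw [reduceAll]; simp [hneg]
      refine ⟨0, ?_, ?_⟩
      · rw [hr]
        have := nf_run u [] 0 (by simpa using hnf)
        simpa using this
      · rw [hr]; omega
    · obtain ⟨x, c, z, hu', hc, hv⟩ := findRedexAux_found u 0 (by omega)
      have hdel : PySem.List.slice u none (some (findRedexAux u 0)) ++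
          PySem.List.slice u (some (findRedexAux u 0 + 3)) none = x ++ z := by
        rw [hv, zero_add]
        rw [PySem.List.slice_to_natCast]
        rw [show ((x.length : Int) + 3) = ((x.length + 3 : Nat) : Int) by push_cast; ring]
        rw [PySem.List.slice_from_natCast]
        subst hu'
        congr 1
        · exact List.take_left ..
        · rw [show x.length + 3 = x.length + 3 from rfl, List.drop_append]
          simp
      have hred : reduceAll u = reduceAll (x ++ z) := by
        rw [reduceAll, dif_neg hneg, hdel]
      have hlen' : (x ++ z).length ≤ n := by
        subst hu'
        simp [List.length_append] at hu ⊢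
        omega
      obtain ⟨k, hfold, hlen⟩ := ih (x ++ z) hlen'
      rw [List.foldl_append] at hfold
      refine ⟨k + 1, ?_, ?_⟩
      · rw [hred]
        subst hu'
        rw [show x ++ '1' :: '1' :: c :: z = (x ++ ['1', '1', c]) ++ z by simp]
        rw [List.foldl_append, List.foldl_append]
        set sx := x.foldl solStepA (([], 0) : List Char × Int) with hsx
        rw [show (['1', '1', c].foldl solStepA sx) = (sx.1, sx.2 + 1) from by
              have := foldl_stepA_block sx.1 sx.2 c hc; simpa using this]
        rw [foldl_stepA_shift z sx 1]
        rw [hfold]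
        push_cast
        ring_nf
      · rw [hred]
        subst hu'
        rw [List.length_append] at hlen ⊢
        simp at hlen ⊢
        omega

theorem solOne_eq (t : String) : solOneA t = solOneB t := by
  obtain ⟨k, hfold, hlen⟩ := main_run t.toList.length t.toList le_rfl
  unfold solOneA solOneB
  simp only [hfold]
  have hcnt : PySem.Int.floordiv (PySem.List.len t.toList - PySem.List.len (reduceAll t.toList)) 3
      = (k : Int) := by
    have h3 : PySem.List.len t.toList - PySem.List.len (reduceAll t.toList) = (3 * k : Int) := by
      simp only [PySem.List.len_eq]
      omega
    rw [h3, PySem.Int.floordiv_eq_ediv_of_pos (by norm_num)]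
    omega
  simp only [hcnt]
  rfl

-- ===== VERDICT (by name: the statement is the Claim_ definition above) =====
theorem solution_spec : Claim_equal_solution := by
  intro s _hd
  unfold Spec_solution solution solution_alt
  rw [show solOneA = solOneB from funext solOne_eq]
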